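-- pv_equiv track=rewrite | github.com/CyanMatter/Reddit-RSS-Image-Scraper | main.py | limit_image_sets
-- ===== SOURCE A (Python) =====
-- from math import ceil
--
-- class ImageData:
--     caption = number = title = author = sub = content = url = file = None
--
--     def __str__(self):
--         return f'''caption: {self.caption}
-- number:  {self.number}
-- title:   {self.title}
-- author:  {self.author}
-- sub:     {self.sub}
-- content: {self.content}
-- url:     {self.url}
-- file:    {self.file}
-- '''
--
--     def copy(self):
--         new = ImageData()
--         new.caption = self.caption
--         new.number = self.number
--         new.title = self.title
--         new.author = self.author
--         new.sub = self.sub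
--         new.content = self.content
--         new.url = self.url
--         new.file = self.file
--         return new
--
-- def total_length(groups: list[list]) -> int:
--     return sum(len(group) for group in groups)
--
-- def limit_image_sets(img_groups: list[list[ImageData]], limit: int) -> list[list[ImageData]]:
--     if total_length(img_groups) <= limit:
--         return img_groups
--
--     smallest_set = img_groups[0]
--     avg = limit // len(img_groups)
--     limited_sets = [smallest_set[:avg]]
--     if len(img_groups) == 1:
--         return limited_sets
--     else:
--         to_limit = limit - ceil(limit / len(img_groups))
--         limited_sets.extend(limit_image_sets(img_groups[1:], to_limit))
--         return limited_sets
-- ===== SOURCE B (Python) =====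
-- def limit_image_sets(img_groups, limit):
--     # one pass with precomputed suffix totals instead of recursion that re-sums the tail each level
--     suffixes = []
--     acc = 0
--     for g in reversed(img_groups):
--         acc += len(g)
--         suffixes.append(acc)
--     suffixes.reverse()
--     out = []
--     lim = limit
--     n = len(img_groups)
--     for i, g in enumerate(img_groups):
--         if suffixes[i] <= lim:
--             out.extend(img_groups[i:])
--             return out
--         rem = n - i
--         out.append(g[:lim // rem])
--         lim -= -(-lim // rem)
--     return out
-- ===== Notes on version B (the rewrite author's own statement) =====
-- stated objective: faster
-- what changed: Replaced A's recursion, which re-sums the entire remaining tail of groups at every level (O(G^2)), with a single iterative pass over precomputed suffix totals so each remaining-length check is O(1).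
import Mathlib
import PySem

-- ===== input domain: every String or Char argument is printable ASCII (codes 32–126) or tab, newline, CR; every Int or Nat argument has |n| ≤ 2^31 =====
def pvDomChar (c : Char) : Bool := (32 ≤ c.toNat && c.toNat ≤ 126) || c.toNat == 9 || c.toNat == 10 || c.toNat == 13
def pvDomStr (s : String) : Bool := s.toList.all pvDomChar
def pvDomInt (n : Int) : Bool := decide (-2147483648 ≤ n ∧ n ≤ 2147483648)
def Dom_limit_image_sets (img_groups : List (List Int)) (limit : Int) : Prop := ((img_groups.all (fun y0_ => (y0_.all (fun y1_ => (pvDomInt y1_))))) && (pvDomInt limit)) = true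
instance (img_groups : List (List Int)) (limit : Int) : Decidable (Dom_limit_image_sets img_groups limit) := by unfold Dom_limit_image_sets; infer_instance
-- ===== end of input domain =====

-- B replaces A's recursion (which re-sums the whole tail at every level, O(G^2)) by one pass
-- over precomputed suffix totals, O(G + output); return values agree wherever A returns.

-- ===== PORT A =====
def pvTotalLength (groups : List (List Int)) : Int :=
  groups.foldl (fun acc g => acc + (g.length : Int)) 0

def limit_image_sets : List (List Int) → Int → List (List Int)
  | [], _ => []  -- Python: returns [] when 0 ≤ limit, raises IndexError otherwise (excluded by Pre_)
  | g :: rest, limit =>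
    if pvTotalLength (g :: rest) ≤ limit then g :: rest
    else
      -- avg = limit // len(img_groups); limited_sets = [smallest_set[:avg]]
      let avg := PySem.Int.floordiv limit ((g :: rest).length : Int)
      let limited := [PySem.List.slice g none (some avg)]
      if rest.isEmpty then limited
      else
        -- ceil(limit / n) ported exactly as -((-limit) // n) (exact integer ceiling division)
        limited ++ limit_image_sets rest (limit - (-(PySem.Int.floordiv (-limit) ((g :: rest).length : Int))))

-- ===== PORT B =====
-- Source B's suffix-totals precomputation: fold over reversed(img_groups) appending running totals, then reverse
def altSuffixes (gs : List (List Int)) : List Int :=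
  let st := gs.reverse.foldl
    (fun (st : Int × List Int) g => (st.1 + (g.length : Int), st.2 ++ [st.1 + (g.length : Int)]))
    (0, [])
  st.2.reverse

-- Source B's main loop: walk the groups alongside their suffix totals, maintaining the current limit
def altLoop : List (List Int) → List Int → Int → List (List Int)
  | [], _, _ => []
  | _ :: _, [], _ => []  -- unreachable: suffix list has the same length as the group list
  | g :: gs, s :: ss, lim =>
    if s ≤ lim then g :: gs
    else
      let rem := ((g :: gs).length : Int)
      PySem.List.slice g none (some (PySem.Int.floordiv lim rem)) ::
        altLoop gs ss (lim - (-(PySem.Int.floordiv (-lim) rem)))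

def limit_image_sets_alt (img_groups : List (List Int)) (limit : Int) : List (List Int) :=
  altLoop img_groups (altSuffixes img_groups) limit

-- ===== PRECONDITION & SPEC =====
-- Pre_ excludes only the empty group list with a negative limit, where Python A raises IndexError.
def Pre_limit_image_sets (img_groups : List (List Int)) (limit : Int) : Prop :=
  img_groups ≠ [] ∨ 0 ≤ limit
instance (img_groups : List (List Int)) (limit : Int) : Decidable (Pre_limit_image_sets img_groups limit) := by unfold Pre_limit_image_sets; infer_instance
def pvWitness_limit_image_sets : List (List Int) × Int := ([[1, 2], [3]], 2)

def Spec_limit_image_sets (img_groups : List (List Int)) (limit : Int) (out : List (List Int)) : Prop := out = limit_image_sets_alt img_groups limit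
instance (img_groups : List (List Int)) (limit : Int) (out : List (List Int)) : Decidable (Spec_limit_image_sets img_groups limit out) := by unfold Spec_limit_image_sets; infer_instance

-- ===== CLAIM (what is proved, stated in full; the proofs are below) =====
def Claim_equal_limit_image_sets : Prop := ∀ (img_groups : List (List Int)) (limit : Int), Dom_limit_image_sets img_groups limit → Pre_limit_image_sets img_groups limit → Spec_limit_image_sets img_groups limit (limit_image_sets img_groups limit)

-- ===== LEMMAS AND PROOFS =====

theorem fold_fst (rs : List (List Int)) (a : Int) (l : List Int) :
    (rs.foldl (fun (st : Int × List Int) g => (st.1 + (g.length : Int), st.2 ++ [st.1 + (g.length : Int)])) (a, l)).1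
      = a + (rs.map (fun g => (g.length : Int))).sum := by
  induction rs generalizing a l with
  | nil => simp
  | cons g gs ih => simp [List.foldl_cons, ih]; ring

theorem totalLength_eq (gs : List (List Int)) :
    pvTotalLength gs = (gs.map (fun g => (g.length : Int))).sum := by
  unfold pvTotalLength
  induction gs with
  | nil => simp
  | cons g rest ih =>
    simp only [List.foldl_cons, List.map_cons, List.sum_cons]
    rw [show (0 : Int) + (g.length : Int) = (g.length : Int) by ring]
    have : ∀ (rs : List (List Int)) (a : Int),
        rs.foldl (fun acc g => acc + (g.length : Int)) a = a + (rs.map (fun g => (g.length : Int))).sum := by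
      intro rs
      induction rs with
      | nil => simp
      | cons r rs ih2 => intro a; simp [List.foldl_cons, ih2]; ring
    rw [this]

theorem altSuffixes_cons (g : List Int) (rest : List (List Int)) :
    altSuffixes (g :: rest) = pvTotalLength (g :: rest) :: altSuffixes rest := by
  unfold altSuffixes
  simp only [List.reverse_cons, List.foldl_append, List.foldl_cons, List.foldl_nil]
  rw [List.reverse_append]
  simp only [List.reverse_singleton, List.singleton_append]
  congr 1
  rw [fold_fst, totalLength_eq]
  simp only [List.map_cons, List.sum_cons]
  rw [List.map_reverse, List.sum_reverse]
  ring

theorem altLoop_eq (gs : List (List Int)) : ∀ lim : Int,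
    altLoop gs (altSuffixes gs) lim = limit_image_sets gs lim := by
  induction gs with
  | nil => intro lim; rfl
  | cons g rest ih =>
    intro lim
    rw [altSuffixes_cons]
    show altLoop (g :: rest) (pvTotalLength (g :: rest) :: altSuffixes rest) lim
        = limit_image_sets (g :: rest) lim
    unfold altLoop limit_image_sets
    by_cases h : pvTotalLength (g :: rest) ≤ lim
    · simp [h]
    · simp only [if_neg h]
      cases rest with
      | nil => rfl
      | cons r rs =>
        simp only [List.isEmpty_cons, List.singleton_append, Bool.false_eq_true, if_false]
        rw [ih]

-- ===== VERDICT (by name: the statement is the Claim_ definition above) =====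
theorem limit_image_sets_spec : Claim_equal_limit_image_sets := by
  intro img_groups limit _ _
  unfold Spec_limit_image_sets limit_image_sets_alt
  exact (altLoop_eq img_groups limit).symm
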